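-- pv_equiv track=rewrite | github.com/tomasvanagas/prime-research | experiments/circuit_complexity/lucy_dp_matrix_structure.py | floor_value_set
-- ===== SOURCE A (Python) =====
-- def floor_value_set(x):
--     """Return sorted floor-value set {floor(x/k) : 1 <= k <= x}."""
--     vals = set()
--     k = 1
--     while k <= x:
--         v = x // k
--         vals.add(v)
--         k = x // v + 1 if v > 0 else x + 1
--     return sorted(vals)
-- ===== SOURCE B (Python) =====
-- def floor_value_set(x):
--     """Return sorted floor-value set {floor(x/k) : 1 <= k <= x}."""
--     if x <= 0:
--         return []
--     vals = set()
--     k = 1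
--     while k * k <= x:
--         vals.add(k)        # small floor values: 1..isqrt(x) are all attained
--         vals.add(x // k)   # large floor values
--         k += 1
--     return sorted(vals)
-- ===== Notes on version B (the rewrite author's own statement) =====
-- stated objective: alternative
-- what changed: Replaces A's adaptive divisor-block jumping (k = x//v + 1) by a fixed scan k = 1..isqrt(x) that collects both k and x//k per step, exploiting the symmetry of the floor-value set.
import Mathlib
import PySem

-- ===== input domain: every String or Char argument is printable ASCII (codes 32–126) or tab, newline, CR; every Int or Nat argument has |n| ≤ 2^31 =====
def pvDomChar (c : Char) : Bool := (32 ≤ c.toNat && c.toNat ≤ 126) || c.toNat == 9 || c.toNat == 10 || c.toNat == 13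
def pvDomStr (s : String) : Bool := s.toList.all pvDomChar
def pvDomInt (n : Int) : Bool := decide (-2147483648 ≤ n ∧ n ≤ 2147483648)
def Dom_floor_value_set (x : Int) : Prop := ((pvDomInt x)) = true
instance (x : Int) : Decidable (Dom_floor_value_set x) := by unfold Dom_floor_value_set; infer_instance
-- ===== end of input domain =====

-- B replaces A's adaptive divisor-block jumping by a fixed scan k = 1..isqrt(x)
-- collecting both k and x//k (objective: alternative decomposition, same cost).


-- ===== PORT A =====
-- termination fact cited by fvsLoopA's decreasing_by: the jump k → x//(x//k)+1 moves right
lemma fvs_le_floordiv_floordiv (x k : Int) (hk : k ≤ x)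
    (hv : 0 < PySem.Int.floordiv x k) :
    k ≤ PySem.Int.floordiv x (PySem.Int.floordiv x k) := by
  rw [PySem.Int.le_floordiv_iff_mul_le hv]
  rcases lt_trichotomy k 0 with hk0 | hk0 | hk0
  · have hm := PySem.Int.mod_neg_bounds x hk0
    have he := PySem.Int.floordiv_mul_add_mod x k
    nlinarith [hm.1, hm.2]
  · subst hk0; simp [PySem.Int.floordiv] at hv
  · have hm := PySem.Int.mod_nonneg x hk0
    have he := PySem.Int.floordiv_mul_add_mod x k
    nlinarith

-- the while loop of A: k jumps to the start of the next divisor block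
def fvsLoopA (x k : Int) (vals : PySem.Set Int) : PySem.Set Int :=
  if hk : k ≤ x then
    let v := PySem.Int.floordiv x k
    fvsLoopA x (if v > 0 then PySem.Int.floordiv x v + 1 else x + 1) (PySem.Set.add vals v)
  else vals
termination_by (x + 1 - k).toNat
decreasing_by
  by_cases hv : PySem.Int.floordiv x k > 0
  · have h2 := fvs_le_floordiv_floordiv x k hk hv
    rw [PySem.Int.floordiv_eq_ediv_of_pos hv] at h2
    simp [hv]; omega
  · simp [hv]; omega

def floor_value_set (x : Int) : List Int :=
  PySem.List.sorted (fvsLoopA x 1 PySem.Set.empty) (fun v => v) false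

-- ===== PORT B =====
-- the while loop of B: fixed scan while k*k <= x, adding k and x//k
def fvsLoopB (x k : Int) (vals : PySem.Set Int) : PySem.Set Int :=
  if hk : k * k ≤ x then
    fvsLoopB x (k + 1) (PySem.Set.add (PySem.Set.add vals k) (PySem.Int.floordiv x k))
  else vals
termination_by (x + 1 - k).toNat
decreasing_by
  have : k ≤ x := by nlinarith [sq_nonneg k, sq_nonneg (k - 1)]
  omega

def floor_value_set_alt (x : Int) : List Int :=
  if x ≤ 0 then []
  else PySem.List.sorted (fvsLoopB x 1 PySem.Set.empty) (fun v => v) false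

-- ===== PRECONDITION & SPEC =====
def Spec_floor_value_set (x : Int) (out : List Int) : Prop := out = floor_value_set_alt x
instance (x : Int) (out : List Int) : Decidable (Spec_floor_value_set x out) := by unfold Spec_floor_value_set; infer_instance

-- ===== CLAIM (what is proved, stated in full; the proofs are below) =====
def Claim_equal_floor_value_set : Prop := ∀ (x : Int), Dom_floor_value_set x → Spec_floor_value_set x (floor_value_set x)

-- ===== LEMMAS AND PROOFS =====

-- within one divisor block [k, x//(x//k)], the quotient is constant
lemma fvs_block_const (x k j : Int) (hk : 0 < k) (hkj : k ≤ j)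
    (hj : j ≤ PySem.Int.floordiv x (PySem.Int.floordiv x k))
    (hv : 0 < PySem.Int.floordiv x k) :
    PySem.Int.floordiv x j = PySem.Int.floordiv x k := by
  have hj0 : 0 < j := lt_of_lt_of_le hk hkj
  have hvk := (PySem.Int.floordiv_eq_iff_of_pos hk).mp (rfl : PySem.Int.floordiv x k = PySem.Int.floordiv x k)
  have hjv : j * PySem.Int.floordiv x k ≤ x := (PySem.Int.le_floordiv_iff_mul_le hv).mp hj
  have hlo : PySem.Int.floordiv x k ≤ PySem.Int.floordiv x j :=
    (PySem.Int.le_floordiv_iff_mul_le hj0).mpr (by linarith [mul_comm j (PySem.Int.floordiv x k)])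
  have hhi : PySem.Int.floordiv x j < PySem.Int.floordiv x k + 1 :=
    (PySem.Int.floordiv_lt_iff_lt_mul hj0).mpr (by nlinarith [hvk.2])
  omega

-- A's loop collects exactly the quotients over divisors ≥ k
lemma fvs_memA (x v : Int) : ∀ (k : Int) (vals : PySem.Set Int), 1 ≤ k →
    (v ∈ fvsLoopA x k vals ↔
      v ∈ vals ∨ ∃ j : Int, k ≤ j ∧ j ≤ x ∧ v = PySem.Int.floordiv x j) := by
  intro k vals
  induction k, vals using fvsLoopA.induct x with
  | case1 k vals hk w ih =>
    intro hk1
    have hk0 : (0:Int) < k := hk1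
    have hv : 0 < PySem.Int.floordiv x k :=
      (PySem.Int.le_floordiv_iff_mul_le hk0).mpr (by omega)
    have hjump := fvs_le_floordiv_floordiv x k hk hv
    rw [dif_pos (show w > 0 from hv)] at ih
    have hjw : k ≤ PySem.Int.floordiv x w := hjump
    have ih' : v ∈ fvsLoopA x (PySem.Int.floordiv x (PySem.Int.floordiv x k) + 1)
          (vals.add (PySem.Int.floordiv x k)) ↔
        v ∈ vals.add (PySem.Int.floordiv x k) ∨
          ∃ j, PySem.Int.floordiv x (PySem.Int.floordiv x k) + 1 ≤ j ∧ j ≤ x ∧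
            v = PySem.Int.floordiv x j := ih (by omega)
    rw [fvsLoopA, dif_pos hk]
    show v ∈ fvsLoopA x
        (if PySem.Int.floordiv x k > 0 then PySem.Int.floordiv x (PySem.Int.floordiv x k) + 1
         else x + 1) (vals.add (PySem.Int.floordiv x k)) ↔ _
    rw [if_pos hv, ih', PySem.Set.mem_add]
    constructor
    · rintro ((h | h) | ⟨j, h1, h2, h3⟩)
      · exact Or.inl h
      · exact Or.inr ⟨k, le_rfl, hk, h⟩
      · exact Or.inr ⟨j, by omega, h2, h3⟩
    · rintro (h | ⟨j, h1, h2, h3⟩)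
      · exact Or.inl (Or.inl h)
      · by_cases hjb : PySem.Int.floordiv x (PySem.Int.floordiv x k) + 1 ≤ j
        · exact Or.inr ⟨j, hjb, h2, h3⟩
        · exact Or.inl (Or.inr (by
            rw [h3, fvs_block_const x k j hk0 h1 (by omega) hv]))
  | case2 k vals hk =>
    intro _
    rw [fvsLoopA, dif_neg hk]
    constructor
    · exact Or.inl
    · rintro (h | ⟨j, h1, h2, h3⟩)
      · exact h
      · omega

-- B's loop collects k and x//k for all scanned k
lemma fvs_memB (x v : Int) : ∀ (k : Int) (vals : PySem.Set Int), 1 ≤ k →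
    (v ∈ fvsLoopB x k vals ↔
      v ∈ vals ∨ ∃ j : Int, k ≤ j ∧ j * j ≤ x ∧ (v = j ∨ v = PySem.Int.floordiv x j)) := by
  intro k vals
  induction k, vals using fvsLoopB.induct x with
  | case1 k vals hk ih =>
    intro hk1
    rw [fvsLoopB, dif_pos hk, ih (by omega)]
    simp only [PySem.Set.mem_add]
    constructor
    · rintro (((h | h) | h) | ⟨j, h1, h2, h3⟩)
      · exact Or.inl h
      · exact Or.inr ⟨k, le_rfl, hk, Or.inl h⟩
      · exact Or.inr ⟨k, le_rfl, hk, Or.inr h⟩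
      · exact Or.inr ⟨j, by omega, h2, h3⟩
    · rintro (h | ⟨j, h1, h2, h3⟩)
      · exact Or.inl (Or.inl (Or.inl h))
      · by_cases hj : k + 1 ≤ j
        · exact Or.inr ⟨j, hj, h2, h3⟩
        · have : j = k := by omega
          subst this
          rcases h3 with h | h
          · exact Or.inl (Or.inl (Or.inr h))
          · exact Or.inl (Or.inr h)
  | case2 k vals hk =>
    intro hk1
    rw [fvsLoopB, dif_neg hk]
    constructor
    · exact Or.inl
    · rintro (h | ⟨j, h1, h2, h3⟩)
      · exact h
      · nlinarith

-- the symmetry of the floor-value set around sqrt(x)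
lemma fvs_bridge (x v : Int) (hx : 1 ≤ x) :
    (∃ j : Int, 1 ≤ j ∧ j ≤ x ∧ v = PySem.Int.floordiv x j) ↔
      (∃ j : Int, 1 ≤ j ∧ j * j ≤ x ∧ (v = j ∨ v = PySem.Int.floordiv x j)) := by
  constructor
  · rintro ⟨j, hj1, hjx, rfl⟩
    have hj0 : (0:Int) < j := hj1
    by_cases hjj : j * j ≤ x
    · exact ⟨j, hj1, hjj, Or.inr rfl⟩
    · set q := PySem.Int.floordiv x j with hq
      have hq1 : 1 ≤ q := (PySem.Int.le_floordiv_iff_mul_le hj0).mpr (by omega)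
      have hqj : q * j ≤ x := (PySem.Int.le_floordiv_iff_mul_le hj0).mp le_rfl
      have hqltj : q < j := by nlinarith
      exact ⟨q, hq1, by nlinarith, Or.inl rfl⟩
  · rintro ⟨j, hj1, hjj, hv | rfl⟩
    · have hj0 : (0:Int) < j := hj1
      set q := PySem.Int.floordiv x j with hq
      have hqj : q * j ≤ x := (PySem.Int.le_floordiv_iff_mul_le hj0).mp le_rfl
      have hjq : j ≤ q := (PySem.Int.le_floordiv_iff_mul_le hj0).mpr hjj
      have hub : x < (q + 1) * j := ((PySem.Int.floordiv_eq_iff_of_pos hj0).mp hq.symm).2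
      have hq0 : (0:Int) < q := by omega
      refine ⟨q, by omega, by nlinarith, ?_⟩
      have hlo : j ≤ PySem.Int.floordiv x q :=
        (PySem.Int.le_floordiv_iff_mul_le hq0).mpr (by nlinarith)
      have hhi : PySem.Int.floordiv x q < j + 1 :=
        (PySem.Int.floordiv_lt_iff_lt_mul hq0).mpr (by nlinarith)
      rw [hv]; omega
    · exact ⟨j, hj1, by nlinarith, rfl⟩

lemma fvs_nodupA (x : Int) : ∀ (k : Int) (vals : PySem.Set Int), vals.Nodup →
    (fvsLoopA x k vals).Nodup := by
  intro k vals
  induction k, vals using fvsLoopA.induct x with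
  | case1 k vals hk w ih =>
    intro h
    rw [fvsLoopA, dif_pos hk]
    exact ih (PySem.Set.nodup_add _ _ h)
  | case2 k vals hk =>
    intro h
    rw [fvsLoopA, dif_neg hk]
    exact h

lemma fvs_nodupB (x : Int) : ∀ (k : Int) (vals : PySem.Set Int), vals.Nodup →
    (fvsLoopB x k vals).Nodup := by
  intro k vals
  induction k, vals using fvsLoopB.induct x with
  | case1 k vals hk ih =>
    intro h
    rw [fvsLoopB, dif_pos hk]
    exact ih (PySem.Set.nodup_add _ _ (PySem.Set.nodup_add _ _ h))
  | case2 k vals hk =>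
    intro h
    rw [fvsLoopB, dif_neg hk]
    exact h

-- ===== VERDICT (by name: the statement is the Claim_ definition above) =====
theorem floor_value_set_spec : Claim_equal_floor_value_set := by
  intro x _
  unfold Spec_floor_value_set floor_value_set floor_value_set_alt
  by_cases hx : x ≤ 0
  · rw [if_pos hx, fvsLoopA]
    simp [show ¬ (1 : Int) ≤ x by omega, PySem.Set.empty]
    rfl
  · rw [if_neg hx]
    apply PySem.List.sorted_eq_sorted_of_perm _ _ _ (fun a b h => h)
    rw [List.perm_ext_iff_of_nodup
      (fvs_nodupA x 1 PySem.Set.empty List.nodup_nil)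
      (fvs_nodupB x 1 PySem.Set.empty List.nodup_nil)]
    intro v
    rw [fvs_memA x v 1 PySem.Set.empty le_rfl, fvs_memB x v 1 PySem.Set.empty le_rfl]
    have := fvs_bridge x v (by omega)
    simp only [PySem.Set.empty]
    constructor
    · rintro (h | h)
      · cases h
      · exact Or.inr (this.mp h)
    · rintro (h | h)
      · cases h
      · exact Or.inr (this.mpr h)
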